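-- pv_equiv track=rewrite | github.com/henryrobbins/llmahd | llamda/ga/utils.py | filter_code
-- ===== SOURCE A (Python) =====
-- def filter_code(code_string: str) -> str:
--     """Remove lines containing signature and import statements."""
--     lines = code_string.split("\n")
--     filtered_lines = []
--     for line in lines:
--         if line.startswith("def"):
--             continue
--         elif line.startswith("import"):
--             continue
--         elif line.startswith("from"):
--             continue
--         elif line.startswith("return"):
--             filtered_lines.append(line)
--             break
--         else:
--             filtered_lines.append(line)
--     code_string = "\n".join(filtered_lines)
--     return code_string
-- ===== SOURCE B (Python) =====
-- def filter_code(code_string: str) -> str: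
--     """Remove lines containing signature and import statements."""
--     kept = []
--     for line in reversed(code_string.split("\n")):
--         if line.startswith("return"):
--             kept = [line]
--         elif line.startswith(("def", "import", "from")):
--             continue
--         else:
--             kept = [line] + kept
--     return "\n".join(kept)
-- ===== Notes on version B (the rewrite author's own statement) =====
-- stated objective: alternative
-- what changed: B builds the result back-to-front: a single pass over the reversed lines with an accumulator that is RESET to [line] whenever a return line is seen (so the first return line, processed last, discards everything after it) and prepends kept lines; there is no break and no cutoff index, unlike A's forward break-loop.
import Mathlib
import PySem

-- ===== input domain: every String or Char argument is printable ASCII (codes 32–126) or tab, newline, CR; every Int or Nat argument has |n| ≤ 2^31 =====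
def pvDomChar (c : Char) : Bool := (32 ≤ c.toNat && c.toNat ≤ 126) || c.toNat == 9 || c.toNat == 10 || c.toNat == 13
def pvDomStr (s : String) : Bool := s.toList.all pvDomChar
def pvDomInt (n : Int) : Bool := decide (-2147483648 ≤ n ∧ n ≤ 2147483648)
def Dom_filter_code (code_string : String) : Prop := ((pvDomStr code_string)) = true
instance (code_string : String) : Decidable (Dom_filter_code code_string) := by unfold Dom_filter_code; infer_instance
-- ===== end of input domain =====

-- B builds the result back-to-front over the reversed lines, resetting the accumulator
-- at each return line instead of breaking a forward loop; same output, no speed claim.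

-- ===== PORT A =====
-- A's forward for-loop with continue/break, one arm per Python branch
-- (split? is some here because the separator "\n" is nonempty, so getD [] never fires)
def filterLoopA : List String → List String
  | [] => []
  | l :: ls =>
    if PySem.Str.startswith l "def" then filterLoopA ls
    else if PySem.Str.startswith l "import" then filterLoopA ls
    else if PySem.Str.startswith l "from" then filterLoopA ls
    else if PySem.Str.startswith l "return" then [l]
    else l :: filterLoopA ls

def filter_code (code_string : String) : String :=
  PySem.Str.join "\n" (filterLoopA ((PySem.Str.split? code_string "\n").getD []))

-- ===== PORT B =====
-- body of Source B's loop: reset on a return line, skip def/import/from, else prepend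
def stepB (kept : List String) (line : String) : List String :=
  if PySem.Str.startswith line "return" then [line]
  else if PySem.Str.startswith line "def" || PySem.Str.startswith line "import"
          || PySem.Str.startswith line "from" then kept
  else line :: kept

-- for line in reversed(lines): kept = stepB kept line
def filter_code_alt (code_string : String) : String :=
  PySem.Str.join "\n"
    (((PySem.Str.split? code_string "\n").getD []).reverse.foldl stepB [])

-- ===== PRECONDITION & SPEC =====
def Spec_filter_code (code_string : String) (out : String) : Prop := out = filter_code_alt code_string
instance (code_string : String) (out : String) : Decidable (Spec_filter_code code_string out) := by unfold Spec_filter_code; infer_instance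

-- ===== CLAIM (what is proved, stated in full; the proofs are below) =====
def Claim_equal_filter_code : Prop := ∀ (code_string : String), Dom_filter_code code_string → Spec_filter_code code_string (filter_code code_string)

-- ===== LEMMAS AND PROOFS =====

-- a prefix pins down the first character, so prefixes with distinct heads exclude each other
lemma chars_head_ne (t ta tb : List Char) (a b : Char) (hab : a ≠ b)
    (h : PySem.Chars.startswith t (a :: ta) = true) :
    PySem.Chars.startswith t (b :: tb) = false := by
  rw [PySem.Chars.startswith_iff] at h
  rcases h with ⟨u, hu⟩
  rw [Bool.eq_false_iff]
  intro hb
  rw [PySem.Chars.startswith_iff] at hb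
  rcases hb with ⟨v, hv⟩
  rw [← hu] at hv
  simp at hv
  exact hab hv.1.symm

-- a 'return' line starts with 'r', so it starts with none of def/import/from
lemma return_excl (t : List Char)
    (h : PySem.Chars.startswith t ['r','e','t','u','r','n'] = true) :
    PySem.Chars.startswith t ['d','e','f'] = false ∧
    PySem.Chars.startswith t ['i','m','p','o','r','t'] = false ∧
    PySem.Chars.startswith t ['f','r','o','m'] = false :=
  ⟨chars_head_ne t _ _ 'r' 'd' (by decide) h,
   chars_head_ne t _ _ 'r' 'i' (by decide) h,
   chars_head_ne t _ _ 'r' 'f' (by decide) h⟩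

-- core invariant: A's forward break-loop equals B's right-to-left accumulation
lemma loop_eq (ls : List String) :
    filterLoopA ls = ls.foldr (fun l acc => stepB acc l) [] := by
  induction ls with
  | nil => simp [filterLoopA]
  | cons l ls ih =>
    by_cases hr : PySem.Chars.startswith l.toList ['r','e','t','u','r','n'] = true
    · obtain ⟨h1, h2, h3⟩ := return_excl l.toList hr
      simp [filterLoopA, stepB, PySem.Str.startswith, hr, h1, h2, h3]
    · have hr' : PySem.Chars.startswith l.toList ['r','e','t','u','r','n'] = false :=
        Bool.eq_false_iff.mpr hr
      simp only [List.foldr_cons, ← ih]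
      by_cases h1 : PySem.Chars.startswith l.toList ['d','e','f'] = true
      · simp [filterLoopA, stepB, PySem.Str.startswith, hr', h1]
      · have h1' := Bool.eq_false_iff.mpr h1
        by_cases h2 : PySem.Chars.startswith l.toList ['i','m','p','o','r','t'] = true
        · simp [filterLoopA, stepB, PySem.Str.startswith, hr', h1', h2]
        · have h2' := Bool.eq_false_iff.mpr h2
          by_cases h3 : PySem.Chars.startswith l.toList ['f','r','o','m'] = true
          · simp [filterLoopA, stepB, PySem.Str.startswith, hr', h1', h2', h3]
          · have h3' := Bool.eq_false_iff.mpr h3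
            simp [filterLoopA, stepB, PySem.Str.startswith, hr', h1', h2', h3']

-- ===== VERDICT (by name: the statement is the Claim_ definition above) =====
theorem filter_code_spec : Claim_equal_filter_code := by
  intro s _
  unfold Spec_filter_code filter_code filter_code_alt
  rw [List.foldl_reverse, ← loop_eq]
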